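-- pv_equiv track=rewrite | github.com/mosot624/pythonRecursiveChallenges | bunny2-test.py | bunny2
-- ===== SOURCE A (Python) =====
-- def bunny2(n):
--     if n == 0:
--         return 0
--     if n == 1:
--         return 2
--     if n % 2 == 0:
--         return 3 + bunny2(n-1)
--     else:
--         return 2 + bunny2(n-1)
-- ===== SOURCE B (Python) =====
-- def bunny2(n):
--     # closed form: each pair of steps (odd+even) contributes 5; a leftover odd step contributes 2
--     return 5 * (n // 2) + 2 * (n % 2)
-- ===== Notes on version B (the rewrite author's own statement) =====
-- stated objective: faster
-- what changed: replaced the linear recursion with the closed-form formula 5*(n//2) + 2*(n%2)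
import Mathlib
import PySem

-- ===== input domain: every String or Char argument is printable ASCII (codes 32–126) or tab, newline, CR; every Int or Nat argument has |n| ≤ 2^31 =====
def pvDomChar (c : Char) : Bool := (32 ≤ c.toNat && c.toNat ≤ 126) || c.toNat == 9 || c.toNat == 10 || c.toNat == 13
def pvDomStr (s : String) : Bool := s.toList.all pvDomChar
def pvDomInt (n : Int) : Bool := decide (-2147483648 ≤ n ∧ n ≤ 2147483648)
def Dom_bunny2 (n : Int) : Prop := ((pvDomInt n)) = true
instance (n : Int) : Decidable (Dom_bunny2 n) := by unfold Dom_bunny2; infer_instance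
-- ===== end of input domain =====

-- B replaces A's linear recursion with the closed form 5*(n//2) + 2*(n%2) (O(1) vs O(n)).


-- ===== PORT A =====
-- A's recursion, on the Nat value of n (Pre_ restricts to n ≥ 0, where this is exact)
def bunny2Aux : Nat → Int
  | 0 => 0
  | 1 => 2
  | (k+2) => if (k + 2) % 2 == 0 then 3 + bunny2Aux (k+1) else 2 + bunny2Aux (k+1)

def bunny2 (n : Int) : Int := bunny2Aux n.toNat

-- ===== PORT B =====
def bunny2_alt (n : Int) : Int :=
  5 * PySem.Int.floordiv n 2 + 2 * PySem.Int.mod n 2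

-- ===== PRECONDITION & SPEC =====
-- Pre_ excludes n < 0, where A's recursion never reaches a base case (RecursionError).
def Pre_bunny2 (n : Int) : Prop := 0 ≤ n
instance (n : Int) : Decidable (Pre_bunny2 n) := by unfold Pre_bunny2; infer_instance
def pvWitness_bunny2 : Int := (7)

def Spec_bunny2 (n : Int) (out : Int) : Prop := out = bunny2_alt n
instance (n : Int) (out : Int) : Decidable (Spec_bunny2 n out) := by unfold Spec_bunny2; infer_instance

-- ===== CLAIM (what is proved, stated in full; the proofs are below) =====
def Claim_equal_bunny2 : Prop := ∀ (n : Int), Dom_bunny2 n → Pre_bunny2 n → Spec_bunny2 n (bunny2 n)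

-- ===== LEMMAS AND PROOFS =====
theorem bunny2Aux_closed : ∀ k : Nat, bunny2Aux k = 5 * ((k : Int) / 2) + 2 * ((k : Int) % 2) := by
  intro k
  induction k with
  | zero => decide
  | succ m ih =>
    cases m with
    | zero => decide
    | succ j =>
      simp only [bunny2Aux, ih]
      rcases Nat.even_or_odd j with ⟨t, ht⟩ | ⟨t, ht⟩ <;> subst ht <;>
        simp only [beq_iff_eq] <;> push_cast <;> omega

-- ===== VERDICT (by name: the statement is the Claim_ definition above) =====
theorem bunny2_spec : Claim_equal_bunny2 := by
  intro n _ hn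
  show bunny2 n = bunny2_alt n
  unfold bunny2 bunny2_alt
  rw [bunny2Aux_closed,
    PySem.Int.floordiv_eq_ediv_of_pos (by omega),
    PySem.Int.mod_eq_emod_of_pos (by omega)]
  rw [Int.toNat_of_nonneg (by exact hn)]
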